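-- pv_equiv track=rewrite | github.com/diegomrodrigues2/algo_ds_challenges | algorithms/backtracking/test_graph_coloring.py | _is_valid_coloring
-- ===== SOURCE A (Python) =====
-- from typing import List, Optional
--
-- def _is_valid_coloring(graph: List[List[int]], colors: List[int]) -> bool:
--     """
--     Verifica se uma coloração é válida.
--
--     Args:
--         graph: Matriz de adjacência do grafo
--         colors: Lista de cores atribuídas aos vértices
--
--     Returns:
--         True se a coloração é válida, False caso contrário
--     """
--     if not colors:
--         return len(graph) == 0
--
--     V = len(graph)
--     if len(colors) != V:
--         return False
--
--     # Verifica se vértices adjacentes têm cores diferentes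
--     for i in range(V):
--         for j in range(i + 1, V):
--             if graph[i][j] == 1 and colors[i] == colors[j]:
--                 return False
--
--     return True
-- ===== SOURCE B (Python) =====
-- from typing import List
--
-- def _is_valid_coloring(graph: List[List[int]], colors: List[int]) -> bool:
--     """Group vertices by color, then check only same-colored pairs for adjacency."""
--     if not colors:
--         return len(graph) == 0
--
--     V = len(graph)
--     if len(colors) != V:
--         return False
--
--     for c in set(colors):
--         group = [i for i in range(V) if colors[i] == c]
--         for k, a in enumerate(group):
--             for b in group[k + 1:]:
--                 if graph[a][b] == 1:
--                     return False
--     return True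
-- ===== Notes on version B (the rewrite author's own statement) =====
-- stated objective: alternative
-- what changed: Instead of scanning all upper-triangle vertex pairs and comparing colors inside the loop, B builds the color classes (indices grouped by color via set(colors) and a filter) and checks adjacency only between pairs inside the same class.
import Mathlib
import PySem

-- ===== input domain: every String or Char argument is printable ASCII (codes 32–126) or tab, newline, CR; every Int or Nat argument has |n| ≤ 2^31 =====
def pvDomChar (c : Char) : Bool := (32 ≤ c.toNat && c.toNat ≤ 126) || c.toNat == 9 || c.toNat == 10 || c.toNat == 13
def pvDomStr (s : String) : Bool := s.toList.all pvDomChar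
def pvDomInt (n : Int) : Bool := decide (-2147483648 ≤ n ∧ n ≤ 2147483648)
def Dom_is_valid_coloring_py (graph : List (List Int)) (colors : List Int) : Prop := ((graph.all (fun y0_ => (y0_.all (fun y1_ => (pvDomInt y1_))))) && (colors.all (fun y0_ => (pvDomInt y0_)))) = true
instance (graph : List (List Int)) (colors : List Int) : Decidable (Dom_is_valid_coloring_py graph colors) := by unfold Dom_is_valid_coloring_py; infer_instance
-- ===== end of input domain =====

-- B groups vertices by color and checks adjacency only inside each color class (different decomposition, not faster).


-- ===== PORT A =====
def is_valid_coloring_py (graph : List (List Int)) (colors : List Int) : Bool :=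
  if colors.isEmpty then decide (graph.length = 0)
  else if (colors.length : Int) ≠ (graph.length : Int) then false
  else
    (PySem.List.pyRange 0 (graph.length : Int) 1).all fun i =>
      (PySem.List.pyRange (i + 1) (graph.length : Int) 1).all fun j =>
        !((PySem.List.pyGetD (PySem.List.pyGetD graph i []) j 0 == 1) &&
          (PySem.List.pyGetD colors i 0 == PySem.List.pyGetD colors j 0))

-- ===== PORT B =====
-- check of 'for k, a in enumerate(group): for b in group[k+1:]: if graph[a][b] == 1: return False'
def pvPairOk (graph : List (List Int)) : List Int → Bool
  | [] => true
  | a :: rest =>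
      (rest.all fun b => !(PySem.List.pyGetD (PySem.List.pyGetD graph a []) b 0 == 1)) &&
      pvPairOk graph rest

def is_valid_coloring_py_alt (graph : List (List Int)) (colors : List Int) : Bool :=
  if colors.isEmpty then decide (graph.length = 0)
  else if (colors.length : Int) ≠ (graph.length : Int) then false
  else
    (PySem.Set.ofList colors).all fun c =>
      pvPairOk graph
        ((PySem.List.pyRange 0 (graph.length : Int) 1).filter fun i => PySem.List.pyGetD colors i 0 == c)

-- ===== PRECONDITION & SPEC =====
-- Pre_ excludes graphs (paired with a matching-length nonempty colors list) having a non-last row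
-- shorter than len(graph): there Python A raises IndexError, or returns False early only when a
-- color conflict happens to precede the short row in its pair order.
def Pre_is_valid_coloring_py (graph : List (List Int)) (colors : List Int) : Prop :=
  colors = [] ∨ colors.length ≠ graph.length ∨
    ∀ row ∈ graph.dropLast, graph.length ≤ row.length
instance (graph : List (List Int)) (colors : List Int) : Decidable (Pre_is_valid_coloring_py graph colors) := by unfold Pre_is_valid_coloring_py; infer_instance

def pvWitness_is_valid_coloring_py : List (List Int) × List Int := ([[0, 1], [1, 0]], [0, 1])

def Spec_is_valid_coloring_py (graph : List (List Int)) (colors : List Int) (out : Bool) : Prop := out = is_valid_coloring_py_alt graph colors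
instance (graph : List (List Int)) (colors : List Int) (out : Bool) : Decidable (Spec_is_valid_coloring_py graph colors out) := by unfold Spec_is_valid_coloring_py; infer_instance

-- ===== CLAIM (what is proved, stated in full; the proofs are below) =====
def Claim_equal_is_valid_coloring_py : Prop := ∀ (graph : List (List Int)) (colors : List Int), Dom_is_valid_coloring_py graph colors → Pre_is_valid_coloring_py graph colors → Spec_is_valid_coloring_py graph colors (is_valid_coloring_py graph colors)

-- ===== LEMMAS AND PROOFS =====

-- In a strictly increasing list, Pairwise R is the same as R on every in-order pair of members.
lemma pairwise_iff_of_sorted {R : Int → Int → Prop} {l : List Int}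
    (h : l.Pairwise (· < ·)) :
    l.Pairwise R ↔ ∀ a b, a ∈ l → b ∈ l → a < b → R a b := by
  induction l with
  | nil => simp
  | cons x t ih =>
    rw [List.pairwise_cons] at h ⊢
    obtain ⟨hlt, hsort⟩ := h
    rw [ih hsort]
    constructor
    · rintro ⟨hx, ht⟩ a b ha hb hab
      rcases List.mem_cons.1 ha with ha' | ha'
      · rcases List.mem_cons.1 hb with hb' | hb'
        · exact absurd hab (by rw [ha', hb']; exact lt_irrefl _)
        · exact ha' ▸ hx _ hb'
      · rcases List.mem_cons.1 hb with hb' | hb'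
        · exact absurd hab (not_lt.2 (le_of_lt (hb' ▸ hlt _ ha')))
        · exact ht _ _ ha' hb' hab
    · intro hall
      refine ⟨fun b hb => hall _ _ (.head _) (.tail _ hb) (hlt _ hb),
              fun a b ha hb hab => hall _ _ (.tail _ ha) (.tail _ hb) hab⟩

lemma pvPairOk_iff (graph : List (List Int)) (l : List Int) :
    pvPairOk graph l = true ↔
      l.Pairwise (fun a b => PySem.List.pyGetD (PySem.List.pyGetD graph a []) b 0 ≠ 1) := by
  induction l with
  | nil => simp [pvPairOk]
  | cons a t ih =>
    simp [pvPairOk, List.all_eq_true, List.pairwise_cons, ih]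

lemma filter_pyRange_sorted (colors : List Int) (V : Int) (c : Int) :
    ((PySem.List.pyRange 0 V 1).filter fun i => PySem.List.pyGetD colors i 0 == c).Pairwise
      (· < ·) :=
  List.Pairwise.filter _ (PySem.List.pairwise_lt_pyRange_one 0 V)

-- ===== VERDICT (by name: the statement is the Claim_ definition above) =====
theorem is_valid_coloring_py_spec : Claim_equal_is_valid_coloring_py := by
  intro graph colors _ _
  unfold Spec_is_valid_coloring_py is_valid_coloring_py is_valid_coloring_py_alt
  by_cases he : colors.isEmpty = true
  · simp [he]
  · by_cases hl : (colors.length : Int) = (graph.length : Int)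
    · rw [if_neg he, if_neg he, if_neg (by omega), if_neg (by omega), Bool.eq_iff_iff]
      simp only [List.all_eq_true, PySem.List.mem_pyRange_one, pvPairOk_iff]
      constructor
      · -- A-check → B-check
        intro hA c hc
        rw [pairwise_iff_of_sorted (filter_pyRange_sorted colors _ c)]
        intro a b ha hb hab
        rw [List.mem_filter, PySem.List.mem_pyRange_one] at ha hb
        have := hA a ⟨ha.1.1, ha.1.2⟩ b ⟨by omega, hb.1.2⟩
        simp only [Bool.not_eq_eq_eq_not, Bool.not_true, Bool.and_eq_false_imp,
          beq_iff_eq, beq_eq_false_iff_ne, ne_eq] at this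
        intro hone
        have hca : PySem.List.pyGetD colors a 0 = c := by simpa using ha.2
        have hcb : PySem.List.pyGetD colors b 0 = c := by simpa using hb.2
        exact (this hone) (hca.trans hcb.symm)
      · -- B-check → A-check
        intro hB i hi j hj
        simp only [Bool.not_eq_eq_eq_not, Bool.not_true, Bool.and_eq_false_imp,
          beq_iff_eq, beq_eq_false_iff_ne, ne_eq]
        intro hone hcc
        have hcmem : PySem.List.pyGetD colors i 0 ∈ colors := by
          have hi0 : (0 : Int) ≤ i := hi.1
          have hilen : i.toNat < colors.length := by omega
          rw [PySem.List.pyGetD_of_nonneg (h := hi0), List.getD_eq_getElem _ _ hilen]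
          exact List.getElem_mem _
        have hp := hB (PySem.List.pyGetD colors i 0)
          (by simpa using ((PySem.Set.mem_ofList colors _).2 hcmem))
        rw [pairwise_iff_of_sorted (filter_pyRange_sorted colors _ _)] at hp
        exact (hp i j
          (by rw [List.mem_filter, PySem.List.mem_pyRange_one]; exact ⟨⟨hi.1, hi.2⟩, by simp⟩)
          (by rw [List.mem_filter, PySem.List.mem_pyRange_one]; exact ⟨⟨by omega, hj.2⟩, by simp [hcc]⟩)
          (by omega)) hone
    · rw [if_neg he, if_neg he, if_pos (by omega), if_pos (by omega)]
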